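-- pv_equiv track=rewrite | github.com/GabrielMBN/GPS-em-BFS-e-DFS | gps.py | bfs
-- ===== SOURCE A (Python) =====
-- from collections import deque
--
-- def bfs(cities, roads, start, end):
--     queue = deque([start])
--     visited = {start: None}
--     while queue:
--         current_city = queue.popleft()
--         if current_city == end:
--             path = []
--             while current_city:
--                 path.append(current_city)
--                 current_city = visited[current_city]
--             path.reverse()
--             return path
--         for neighbor, distance in get_neighbors(current_city, roads):
--             if neighbor not in visited:
--                 visited[neighbor] = current_city
--                 queue.append(neighbor)
--
-- def get_neighbors(city, roads):
--     neighbors = []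
--     for road in roads:
--         if city in road:
--             neighbor = road[0] if road[1] == city else road[1]
--             distance = road[2]
--             neighbors.append((neighbor, distance))
--     return neighbors
-- ===== SOURCE B (Python) =====
-- def bfs(cities, roads, start, end):
--     # Build the adjacency list once instead of rescanning all roads
--     # for every dequeued city.
--     adj = {}
--     for a, b, d in roads:
--         adj.setdefault(a, []).append(b)
--         if a != b:
--             adj.setdefault(b, []).append(a)
--     parent = {start: None}
--     queue = [start]
--     head = 0
--     while head < len(queue):
--         cur = queue[head]
--         head += 1
--         if cur == end:
--             path = []
--             while cur:
--                 path = [cur] + path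
--                 cur = parent[cur]
--             return path
--         for n in adj.get(cur, []):
--             _visit(cur, parent, queue, n)
--     return None
--
-- def _visit(cur, parent, queue, n):
--     if n not in parent:
--         parent[n] = cur
--         queue.append(n)
-- ===== Notes on version B (the rewrite author's own statement) =====
-- stated objective: alternative
-- what changed: B builds an adjacency dictionary once and runs BFS with an index-pointer queue, so the per-dequeue scan of the whole road list disappears; the path is reconstructed by prepending instead of append-then-reverse.
import Mathlib
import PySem

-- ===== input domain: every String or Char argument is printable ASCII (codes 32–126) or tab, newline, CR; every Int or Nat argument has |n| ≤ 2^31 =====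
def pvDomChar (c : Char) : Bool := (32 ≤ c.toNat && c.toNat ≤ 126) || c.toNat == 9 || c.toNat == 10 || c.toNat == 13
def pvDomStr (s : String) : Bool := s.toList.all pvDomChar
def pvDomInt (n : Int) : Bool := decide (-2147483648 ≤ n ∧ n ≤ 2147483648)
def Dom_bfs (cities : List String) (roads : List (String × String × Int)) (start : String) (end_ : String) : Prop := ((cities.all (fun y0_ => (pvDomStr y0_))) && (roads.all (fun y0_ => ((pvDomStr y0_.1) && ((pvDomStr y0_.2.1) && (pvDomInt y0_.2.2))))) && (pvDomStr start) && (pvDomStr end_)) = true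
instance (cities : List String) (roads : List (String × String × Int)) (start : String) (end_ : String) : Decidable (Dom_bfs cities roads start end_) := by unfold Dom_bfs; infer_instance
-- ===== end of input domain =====

-- B replaces A's per-dequeue scan of all roads by an adjacency dictionary built once (alternative algorithm, same return value).

-- ===== PORT A =====
-- get_neighbors(city, roads): `city in road` tests membership in the 3-tuple; city (a str)
-- can never equal road[2] (an int), so it is city == road[0] or city == road[1].
def pvGetNeighbors (city : String) (roads : List (String × String × Int)) : List (String × Int) :=
  roads.foldl (fun neighbors road =>
    if city = road.1 ∨ city = road.2.1 then
      neighbors ++ [((if road.2.1 = city then road.1 else road.2.1), road.2.2)]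
    else neighbors) []

-- path reconstruction: `while current_city:` (stops on None and on the empty string).
-- visited[current_city]: the key is always present for any city ever enqueued, so Python
-- never raises here; getD's default is unreachable.
def pvWalkA (visited : PySem.Dict String (Option String)) (cur : Option String)
    (path : List String) (fuel : Nat) : Option (List String) :=
  match fuel with
  | 0 => none
  | fuel + 1 =>
    match cur with
    | none => some path.reverse
    | some s =>
      if s = "" then some path.reverse
      else pvWalkA visited (visited.getD s none) (path ++ [s]) fuel

-- the `while queue:` loop; fuel 2*|roads|+2 bounds the number of iterations (each iteration
-- pops an enqueued city; at most 2*|roads|+1 distinct cities are ever enqueued).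
def pvLoopA (roads : List (String × String × Int)) (end_ : String)
    (queue : List String) (visited : PySem.Dict String (Option String)) (fuel : Nat) :
    Option (List String) :=
  match fuel with
  | 0 => none
  | fuel + 1 =>
    match queue with
    | [] => none
    | c :: qs =>
      if c = end_ then pvWalkA visited (some c) [] (visited.items.length + 1)
      else
        let st := (pvGetNeighbors c roads).foldl
          (fun (p : List String × PySem.Dict String (Option String)) nd =>
            if p.2.contains nd.1 then p else (p.1 ++ [nd.1], p.2.insert nd.1 (some c)))
          (qs, visited)
        pvLoopA roads end_ st.1 st.2 fuel

def bfs (cities : List String) (roads : List (String × String × Int)) (start : String) (end_ : String) : Option (List String) :=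
  pvLoopA roads end_ [start] (PySem.Dict.empty.insert start none) (2 * roads.length + 2)

-- ===== PORT B =====
-- B's mutable state: the parent dictionary and the growing queue list.
structure PvState where
  parent : PySem.Dict String (Option String)
  queue  : List String
  deriving Repr

-- adjacency dictionary: for each road (a,b,d) append b to adj[a] and, when a ≠ b, a to adj[b].
def pvBuildAdj (roads : List (String × String × Int)) : PySem.Dict String (List String) :=
  roads.foldl (fun adj road =>
    let adj1 := adj.insert road.1 (adj.getD road.1 [] ++ [road.2.1])
    if road.1 = road.2.1 then adj1
    else adj1.insert road.2.1 (adj1.getD road.2.1 [] ++ [road.1]))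
    PySem.Dict.empty

-- path reconstruction by prepending (`path = [cur] + path`), same `while cur:` condition.
def pvPathB (parent : PySem.Dict String (Option String)) (cur : Option String)
    (path : List String) (fuel : Nat) : Option (List String) :=
  if fuel = 0 then none
  else
    match cur with
    | none => some path
    | some s =>
      if s = "" then some path
      else pvPathB parent (parent.getD s none) (s :: path) (fuel - 1)
termination_by fuel
decreasing_by omega

-- the body of `_visit(cur, parent, queue, n)`.
def pvVisit (cur : String) (st : PvState) (n : String) : PvState :=
  if st.parent.contains n then st
  else { parent := st.parent.insert n (some cur), queue := st.queue ++ [n] }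

-- `while head < len(queue):` with an index pointer; same fuel bound as A's loop.
def pvLoopB (adj : PySem.Dict String (List String)) (end_ : String)
    (st : PvState) (head : Nat) (fuel : Nat) : Option (List String) :=
  if fuel = 0 then none
  else if head < st.queue.length then
    let c := st.queue.getD head ""
    if c = end_ then pvPathB st.parent (some c) [] (st.parent.items.length + 1)
    else pvLoopB adj end_ ((adj.getD c []).foldl (pvVisit c) st) (head + 1) (fuel - 1)
  else none
termination_by fuel
decreasing_by omega

def bfs_alt (cities : List String) (roads : List (String × String × Int)) (start : String) (end_ : String) : Option (List String) :=
  pvLoopB (pvBuildAdj roads) end_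
    { parent := PySem.Dict.empty.insert start none, queue := [start] } 0 (2 * roads.length + 2)

-- ===== PRECONDITION & SPEC =====
def Spec_bfs (cities : List String) (roads : List (String × String × Int)) (start : String) (end_ : String) (out : Option (List String)) : Prop := out = bfs_alt cities roads start end_
instance (cities : List String) (roads : List (String × String × Int)) (start : String) (end_ : String) (out : Option (List String)) : Decidable (Spec_bfs cities roads start end_ out) := by unfold Spec_bfs; infer_instance

-- ===== CLAIM (what is proved, stated in full; the proofs are below) =====
def Claim_equal_bfs : Prop := ∀ (cities : List String) (roads : List (String × String × Int)) (start : String) (end_ : String), Dom_bfs cities roads start end_ → Spec_bfs cities roads start end_ (bfs cities roads start end_)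

-- ===== LEMMAS AND PROOFS =====

-- unfolding equations for the fuel-recursive B-side definitions
theorem pvPathB_zero (p : PySem.Dict String (Option String)) (cur : Option String) (path : List String) :
    pvPathB p cur path 0 = none := by unfold pvPathB; simp

theorem pvPathB_none (p : PySem.Dict String (Option String)) (path : List String) (f : Nat) :
    pvPathB p none path (f + 1) = some path := by unfold pvPathB; simp

theorem pvPathB_some (p : PySem.Dict String (Option String)) (s : String) (path : List String) (f : Nat) :
    pvPathB p (some s) path (f + 1)
      = if s = "" then some path else pvPathB p (p.getD s none) (s :: path) f := by
  conv_lhs => rw [pvPathB.eq_def]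
  simp

theorem pvLoopB_zero (adj : PySem.Dict String (List String)) (e : String) (st : PvState) (head : Nat) :
    pvLoopB adj e st head 0 = none := by unfold pvLoopB; simp

theorem pvLoopB_succ (adj : PySem.Dict String (List String)) (e : String) (st : PvState)
    (head : Nat) (f : Nat) :
    pvLoopB adj e st head (f + 1)
      = if head < st.queue.length then
          if st.queue.getD head "" = e then
            pvPathB st.parent (some (st.queue.getD head "")) [] (st.parent.items.length + 1)
          else
            pvLoopB adj e ((adj.getD (st.queue.getD head "") []).foldl
              (pvVisit (st.queue.getD head "")) st) (head + 1) f
        else none := by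
  conv_lhs => rw [pvLoopB.eq_def]
  simp

-- pvPathB with an accumulator = pvPathB with [] followed by appending the accumulator
theorem pvPathB_acc (parent : PySem.Dict String (Option String)) (fuel : Nat) :
    ∀ (cur : Option String) (path : List String),
      pvPathB parent cur path fuel = (pvPathB parent cur [] fuel).map (· ++ path) := by
  induction fuel with
  | zero => intro cur path; simp [pvPathB_zero]
  | succ f ih =>
    intro cur path
    match cur with
    | none => simp [pvPathB_none]
    | some s =>
      by_cases hs : s = ""
      · simp [pvPathB_some, hs]
      · rw [pvPathB_some, pvPathB_some, if_neg hs, if_neg hs, ih _ (s :: path), ih _ [s]]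
        cases pvPathB parent (parent.getD s none) [] f <;> simp

-- A's append-then-reverse walk computes the same list as B's prepend walk
theorem pvWalkA_eq_pvPathB (visited : PySem.Dict String (Option String)) (fuel : Nat) :
    ∀ (cur : Option String) (path : List String),
      pvWalkA visited cur path fuel = (pvPathB visited cur [] fuel).map (· ++ path.reverse) := by
  induction fuel with
  | zero => intro cur path; simp [pvWalkA, pvPathB_zero]
  | succ f ih =>
    intro cur path
    match cur with
    | none => simp [pvWalkA, pvPathB_none]
    | some s =>
      by_cases hs : s = ""
      · simp [pvWalkA, pvPathB_some, hs]
      · simp only [pvWalkA, hs, if_false]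
        rw [pvPathB_some, if_neg hs, ih _ (path ++ [s]), pvPathB_acc _ _ _ [s]]
        cases pvPathB visited (visited.getD s none) [] f <;> simp

-- A's neighbor scan as a filter-and-map over the road list
theorem pvGetNeighbors_eq (c : String) (roads : List (String × String × Int)) :
    pvGetNeighbors c roads
      = (roads.filter (fun road => decide (c = road.1 ∨ c = road.2.1))).map
          (fun road => ((if road.2.1 = c then road.1 else road.2.1), road.2.2)) := by
  simpa using PySem.List.foldl_append_if
    (fun road : String × String × Int => decide (c = road.1 ∨ c = road.2.1))
    (fun road : String × String × Int => ((if road.2.1 = c then road.1 else road.2.1), road.2.2))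
    roads []

-- the neighbor list A recomputes for a city is exactly that city's entry in B's adjacency dict
theorem adj_getD (roads : List (String × String × Int)) :
    ∀ (adj : PySem.Dict String (List String)) (c : String),
      (roads.foldl (fun adj road =>
        let adj1 := adj.insert road.1 (adj.getD road.1 [] ++ [road.2.1])
        if road.1 = road.2.1 then adj1
        else adj1.insert road.2.1 (adj1.getD road.2.1 [] ++ [road.1])) adj).getD c []
      = adj.getD c [] ++ (pvGetNeighbors c roads).map Prod.fst := by
  induction roads with
  | nil => intro adj c; simp [pvGetNeighbors]
  | cons r rs ih =>
    intro adj c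
    rw [List.foldl_cons, ih, pvGetNeighbors_eq, pvGetNeighbors_eq]
    simp only [List.filter_cons, List.map_map]
    obtain ⟨a, b, d⟩ := r
    by_cases hca : c = a <;> by_cases hcb : c = b <;> by_cases hab : a = b <;>
      simp_all [PySem.Dict.getD_insert]

-- the inner discovery loop: B's pvVisit fold over the names of A's neighbor pairs, with the
-- already-processed queue prefix P carried along unchanged, simulates A's fold
theorem fold_discover (c : String) (ns : List (String × Int)) :
    ∀ (P q : List String) (v : PySem.Dict String (Option String)),
      (ns.map Prod.fst).foldl (pvVisit c) ⟨v, P ++ q⟩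
      = ⟨(ns.foldl (fun (p : List String × PySem.Dict String (Option String)) nd =>
            if p.2.contains nd.1 then p else (p.1 ++ [nd.1], p.2.insert nd.1 (some c))) (q, v)).2,
         P ++ (ns.foldl (fun (p : List String × PySem.Dict String (Option String)) nd =>
            if p.2.contains nd.1 then p else (p.1 ++ [nd.1], p.2.insert nd.1 (some c))) (q, v)).1⟩ := by
  induction ns with
  | nil => intro P q v; simp
  | cons n ns ih =>
    intro P q v
    by_cases hv : v.contains n.1
    · simpa [pvVisit, hv] using ih P q v
    · have h1 : (P ++ q) ++ [n.1] = P ++ (q ++ [n.1]) := List.append_assoc P q [n.1]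
      simp only [List.map_cons, List.foldl_cons, pvVisit, hv, Bool.false_eq_true, if_false, h1]
      exact ih P (q ++ [n.1]) (v.insert n.1 (some c))

-- main bisimulation: A's pop-from-the-front queue vs B's index pointer into the grown list
theorem loopA_eq_loopB (roads : List (String × String × Int)) (end_ : String) (fuel : Nat) :
    ∀ (P q : List String) (v : PySem.Dict String (Option String)),
      pvLoopA roads end_ q v fuel
      = pvLoopB (pvBuildAdj roads) end_ ⟨v, P ++ q⟩ P.length fuel := by
  induction fuel with
  | zero => intro P q v; simp [pvLoopA, pvLoopB_zero]
  | succ f ih =>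
    intro P q v
    match q with
    | [] => simp [pvLoopA, pvLoopB_succ]
    | c :: qs =>
      have hlt : P.length < (P ++ c :: qs).length := by simp
      have hget : (P ++ c :: qs).getD P.length "" = c := by
        simp [List.getD_eq_getElem?_getD]
      by_cases hce : c = end_
      · simp only [pvLoopA, pvLoopB_succ, if_pos hlt, hget, hce, if_true, if_pos rfl]
        rw [pvWalkA_eq_pvPathB]
        simp
      · have hadj : (pvBuildAdj roads).getD c [] = (pvGetNeighbors c roads).map Prod.fst := by
          simpa [PySem.Dict.getD_empty] using adj_getD roads PySem.Dict.empty c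
        simp only [pvLoopA, pvLoopB_succ, if_pos hlt, hget, hce, if_false, if_neg hce]
        rw [hadj]
        have hsplit : P ++ c :: qs = (P ++ [c]) ++ qs := by simp
        rw [hsplit, fold_discover]
        have := ih (P ++ [c])
          ((pvGetNeighbors c roads).foldl
            (fun (p : List String × PySem.Dict String (Option String)) nd =>
              if p.2.contains nd.1 then p else (p.1 ++ [nd.1], p.2.insert nd.1 (some c)))
            (qs, v)).1
          ((pvGetNeighbors c roads).foldl
            (fun (p : List String × PySem.Dict String (Option String)) nd =>
              if p.2.contains nd.1 then p else (p.1 ++ [nd.1], p.2.insert nd.1 (some c)))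
            (qs, v)).2
        simp only [List.length_append, List.length_cons, List.length_nil] at this ⊢
        exact this

-- ===== VERDICT (by name: the statement is the Claim_ definition above) =====
theorem bfs_spec : Claim_equal_bfs := by
  intro cities roads start end_ _
  show bfs cities roads start end_ = bfs_alt cities roads start end_
  unfold bfs bfs_alt
  simpa using loopA_eq_loopB roads end_ (2 * roads.length + 2) [] [start]
    (PySem.Dict.empty.insert start none)
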